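-- pv_equiv track=rewrite | github.com/ZosiaZamoyska/algorithms | solutions/introduction/Prefix Sum/MushroomGathering.py | max_mushrooms
-- ===== SOURCE A (Python) =====
-- def max_mushrooms(a, k, m):
--     n = len(a)
--     prefix_sum = [0] * (n + 1)
--
--     for i in range(n):
--         prefix_sum[i + 1] = prefix_sum[i] + a[i]
--
--     max_collected = 0
--
--     for i in range(min(m, k) + 1):
--         left_pos = k - i
--         remaining_moves = m - 2 * i
--         right_pos = min(n - 1, max(k, k + remaining_moves))
--         max_collected = max(max_collected, prefix_sum[right_pos + 1] - prefix_sum[left_pos])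
--
--     for i in range(min(m, n - k - 1) + 1):
--         right_pos = k + i
--         remaining_moves = m - 2 * i
--         left_pos = max(0, min(k, k - remaining_moves))
--         max_collected = max(max_collected, prefix_sum[right_pos + 1] - prefix_sum[left_pos])
--
--     return max_collected
-- ===== SOURCE B (Python) =====
-- def max_mushrooms(a, k, m):
--     n = len(a)
--     windows = [(k - i, min(n - 1, max(k, k + m - 2 * i)))
--                for i in range(min(m, k) + 1)]
--     windows += [(max(0, min(k, k - m + 2 * i)), k + i)
--                 for i in range(min(m, n - k - 1) + 1)]
--     return max([0] + [sum(a[l:r + 1]) for (l, r) in windows])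
-- ===== Notes on version B (the rewrite author's own statement) =====
-- stated objective: simpler
-- what changed: B drops the precomputed prefix-sum table entirely: it builds the list of candidate (left,right) windows with two comprehensions and returns the max of the direct slice sums sum(a[l:r+1]), replacing build-table-then-scan with direct window summation.
-- outside the precondition, e.g. on max_mushrooms([7], -2, 1): A returns 7, B returns 0; on max_mushrooms([1, 2, 3], 4, 0): A raises IndexError, B returns 0
import Mathlib
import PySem

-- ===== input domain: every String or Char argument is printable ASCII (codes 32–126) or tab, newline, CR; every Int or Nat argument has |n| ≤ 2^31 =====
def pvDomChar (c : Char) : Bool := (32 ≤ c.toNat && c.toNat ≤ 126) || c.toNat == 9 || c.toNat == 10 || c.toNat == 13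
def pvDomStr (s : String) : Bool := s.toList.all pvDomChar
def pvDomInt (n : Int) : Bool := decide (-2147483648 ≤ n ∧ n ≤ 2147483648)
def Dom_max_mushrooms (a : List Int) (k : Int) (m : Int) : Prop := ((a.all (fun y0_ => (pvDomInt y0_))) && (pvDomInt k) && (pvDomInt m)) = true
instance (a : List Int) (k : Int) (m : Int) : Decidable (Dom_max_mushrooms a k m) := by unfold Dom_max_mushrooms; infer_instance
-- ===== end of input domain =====

-- B removes the prefix-sum table and takes the max of direct slice sums over the same
-- candidate windows (simpler: shorter and plainer, no auxiliary table).

-- ===== PORT A =====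
def max_mushrooms (a : List Int) (k : Int) (m : Int) : Int :=
  let n : Int := (a.length : Int)
  let prefixS : List Int :=
    (PySem.List.pyRange 0 n 1).foldl
      (fun ps i => PySem.List.pySetD ps (i + 1)
        (PySem.List.pyGetD ps i 0 + PySem.List.pyGetD a i 0))
      (List.replicate (n + 1).toNat 0)
  let mc1 : Int :=
    (PySem.List.pyRange 0 (min m k + 1) 1).foldl
      (fun mc i =>
        let left_pos := k - i
        let remaining_moves := m - 2 * i
        let right_pos := min (n - 1) (max k (k + remaining_moves))
        max mc (PySem.List.pyGetD prefixS (right_pos + 1) 0 - PySem.List.pyGetD prefixS left_pos 0))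
      0
  (PySem.List.pyRange 0 (min m (n - k - 1) + 1) 1).foldl
    (fun mc i =>
      let right_pos := k + i
      let remaining_moves := m - 2 * i
      let left_pos := max 0 (min k (k - remaining_moves))
      max mc (PySem.List.pyGetD prefixS (right_pos + 1) 0 - PySem.List.pyGetD prefixS left_pos 0))
    mc1

-- ===== PORT B =====
def max_mushrooms_alt (a : List Int) (k : Int) (m : Int) : Int :=
  let n : Int := (a.length : Int)
  let windows : List (Int × Int) :=
    (PySem.List.pyRange 0 (min m k + 1) 1).map
      (fun i => (k - i, min (n - 1) (max k (k + m - 2 * i))))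
    ++
    (PySem.List.pyRange 0 (min m (n - k - 1) + 1) 1).map
      (fun i => (max 0 (min k (k - m + 2 * i)), k + i))
  (PySem.List.max?
    (0 :: windows.map (fun lr => (PySem.List.slice a (some lr.1) (some (lr.2 + 1))).sum))
    (fun y => y)).getD 0

-- ===== PRECONDITION & SPEC =====
-- Pre_ admits the natural domain 0 ≤ k ≤ len(a) (a start position on the strip, with the
-- k = n edge A also handles), plus every input with m < 0 (no moves: both loops are empty).
-- Excluded are out-of-range k with m ≥ 0, where A either raises IndexError (k > n) or
-- returns a value produced by Python's negative-index wraparound into the prefix table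
-- (k < 0), an accident of the implementation.
def Pre_max_mushrooms (a : List Int) (k : Int) (m : Int) : Prop :=
  (0 ≤ k ∧ k ≤ (a.length : Int)) ∨ m < 0
instance (a : List Int) (k : Int) (m : Int) : Decidable (Pre_max_mushrooms a k m) := by
  unfold Pre_max_mushrooms; infer_instance

def pvWitness_max_mushrooms : List Int × Int × Int := ([3, 1, 2], 1, 2)

def Spec_max_mushrooms (a : List Int) (k : Int) (m : Int) (out : Int) : Prop := out = max_mushrooms_alt a k m
instance (a : List Int) (k : Int) (m : Int) (out : Int) : Decidable (Spec_max_mushrooms a k m out) := by unfold Spec_max_mushrooms; infer_instance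

-- ===== CLAIM (what is proved, stated in full; the proofs are below) =====
def Claim_equal_max_mushrooms : Prop := ∀ (a : List Int) (k : Int) (m : Int), Dom_max_mushrooms a k m → Pre_max_mushrooms a k m → Spec_max_mushrooms a k m (max_mushrooms a k m)

-- ===== LEMMAS AND PROOFS =====

-- loop invariant: after t steps the table holds the first t+1 prefix sums, zeros beyond
theorem prefix_build_aux (a : List Int) (t : Nat) (ht : t ≤ a.length) :
    (PySem.List.pyRange 0 (t : Int) 1).foldl
      (fun ps i => PySem.List.pySetD ps (i + 1)
        (PySem.List.pyGetD ps i 0 + PySem.List.pyGetD a i 0))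
      (List.replicate ((a.length : Int) + 1).toNat 0)
    = (List.range (a.length + 1)).map (fun j => if j ≤ t then ((a.take j).sum : Int) else 0) := by
  induction t with
  | zero =>
    rw [show ((0 : Nat) : Int) = 0 by norm_num, PySem.List.pyRange_one_eq_nil (le_refl 0)]
    simp only [List.foldl_nil]
    apply List.ext_getElem
    · simp
    · intro j hj hj'
      simp only [List.getElem_replicate, List.getElem_map, List.getElem_range]
      rcases Nat.eq_zero_or_pos j with h | h
      · subst h; simp
      · simp [Nat.pos_iff_ne_zero.mp h]
  | succ t ih =>
    have ht' : t ≤ a.length := Nat.le_of_succ_le ht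
    have hcast : ((t + 1 : Nat) : Int) = (t : Int) + 1 := by push_cast; ring
    rw [hcast, PySem.List.pyRange_one_succ_right (by positivity), List.foldl_append,
        ih ht']
    simp only [List.foldl_cons, List.foldl_nil]
    rw [show (t : Int) + 1 = ((t + 1 : Nat) : Int) by push_cast; ring,
        PySem.List.pySetD_natCast, PySem.List.pyGetD_natCast, PySem.List.pyGetD_natCast]
    have hgt : ((List.range (a.length + 1)).map
        (fun j => if j ≤ t then ((a.take j).sum : Int) else 0)).getD t 0
        = (a.take t).sum := by
      rw [List.getD_eq_getElem _ _ (by simp; omega)]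
      simp
    have hga : a.getD t 0 = a[t]'(by omega) := by
      rw [List.getD_eq_getElem _ _ (by omega)]
    rw [hgt, hga]
    apply List.ext_getElem
    · simp
    · intro j hj hj'
      rw [List.getElem_set]
      simp only [List.getElem_map, List.getElem_range]
      by_cases hjt : t + 1 = j
      · subst hjt
        simp [List.sum_take_succ a t (by omega)]
      · rw [if_neg hjt]
        by_cases h1 : j ≤ t
        · rw [if_pos h1, if_pos (by omega)]
        · rw [if_neg h1, if_neg (by omega)]

-- the prefix table A builds is the table of prefix sums
theorem prefix_build (a : List Int) :
    (PySem.List.pyRange 0 (a.length : Int) 1).foldl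
      (fun ps i => PySem.List.pySetD ps (i + 1)
        (PySem.List.pyGetD ps i 0 + PySem.List.pyGetD a i 0))
      (List.replicate ((a.length : Int) + 1).toNat 0)
    = (List.range (a.length + 1)).map (fun j => ((a.take j).sum : Int)) := by
  rw [prefix_build_aux a a.length (le_refl _)]
  apply List.map_congr_left
  intro j hj
  rw [List.mem_range] at hj
  rw [if_pos (by omega)]

-- reading the prefix table at an in-range index
theorem prefix_read (a : List Int) (i : Int) (h0 : 0 ≤ i) (h1 : i ≤ (a.length : Int)) :
    PySem.List.pyGetD ((List.range (a.length + 1)).map (fun j => ((a.take j).sum : Int))) i 0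
    = (a.take i.toNat).sum := by
  rw [PySem.List.pyGetD_eq_getElem _ _ h0 (by simp; omega)]
  simp

-- a nonempty in-range slice sums to the difference of prefix sums
theorem slice_sum (a : List Int) (l r1 : Int) (h0 : 0 ≤ l) (h1 : l ≤ r1) :
    (PySem.List.slice a (some l) (some r1)).sum
    = (a.take r1.toNat).sum - (a.take l.toNat).sum := by
  rw [PySem.List.slice_toNat a h0 (le_trans h0 h1)]
  have h3 : a.take r1.toNat = a.take l.toNat ++ (a.drop l.toNat).take (r1.toNat - l.toNat) := by
    rw [← List.take_add]
    congr 1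
    omega
  rw [h3, List.sum_append]
  ring

-- per-iteration value equality for A's first loop vs B's first window batch
theorem loop1_val (a : List Int) (k m i : Int) (hkn : k ≤ (a.length : Int))
    (hi0 : 0 ≤ i) (hik : i ≤ k) :
    PySem.List.pyGetD ((List.range (a.length + 1)).map (fun j => ((a.take j).sum : Int)))
        (min ((a.length : Int) - 1) (max k (k + (m - 2 * i))) + 1) 0
      - PySem.List.pyGetD ((List.range (a.length + 1)).map (fun j => ((a.take j).sum : Int)))
        (k - i) 0
    = (PySem.List.slice a (some (k - i))
        (some (min ((a.length : Int) - 1) (max k (k + m - 2 * i)) + 1))).sum := by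
  have e : k + (m - 2 * i) = k + m - 2 * i := by ring
  rw [e]
  set n : Int := (a.length : Int) with hn
  set r1 : Int := min (n - 1) (max k (k + m - 2 * i)) + 1 with hr1
  set l : Int := k - i with hl
  have hl0 : 0 ≤ l := by omega
  have hr1n : r1 ≤ n := by omega
  have hlr : l ≤ r1 := by
    have h1 : k ≤ max k (k + m - 2 * i) := le_max_left _ _
    omega
  rw [prefix_read a r1 (by omega) hr1n, prefix_read a l hl0 (by omega),
      slice_sum a l r1 hl0 hlr]

-- per-iteration value equality for A's second loop vs B's second window batch
theorem loop2_val (a : List Int) (k m i : Int) (hk0 : 0 ≤ k)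
    (hi0 : 0 ≤ i) (hik : i ≤ (a.length : Int) - k - 1) :
    PySem.List.pyGetD ((List.range (a.length + 1)).map (fun j => ((a.take j).sum : Int)))
        (k + i + 1) 0
      - PySem.List.pyGetD ((List.range (a.length + 1)).map (fun j => ((a.take j).sum : Int)))
        (max 0 (min k (k - (m - 2 * i)))) 0
    = (PySem.List.slice a (some (max 0 (min k (k - m + 2 * i)))) (some (k + i + 1))).sum := by
  have e : k - (m - 2 * i) = k - m + 2 * i := by ring
  rw [e]
  set n : Int := (a.length : Int) with hn
  set l : Int := max 0 (min k (k - m + 2 * i)) with hl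
  have hl0 : 0 ≤ l := le_max_left _ _
  have hlk : l ≤ k := by
    have h1 : min k (k - m + 2 * i) ≤ k := min_le_left _ _
    omega
  rw [prefix_read a (k + i + 1) (by omega) (by omega), prefix_read a l hl0 (by omega),
      slice_sum a l (k + i + 1) hl0 (by omega)]

-- ===== VERDICT (by name: the statement is the Claim_ definition above) =====
theorem max_mushrooms_spec : Claim_equal_max_mushrooms := by
  intro a k m _ hpre
  unfold Spec_max_mushrooms
  by_cases hc : 0 ≤ k ∧ k ≤ (a.length : Int)
  case neg =>
    -- m < 0: both loops are empty in A and both comprehensions are empty in B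
    have hm : m < 0 := by
      rcases hpre with h | h
      · exact absurd h hc
      · exact h
    have e1 : PySem.List.pyRange 0 (min m k + 1) = [] :=
      PySem.List.pyRange_one_eq_nil (by omega)
    have e2 : PySem.List.pyRange 0 (min m ((a.length : Int) - k - 1) + 1) = [] :=
      PySem.List.pyRange_one_eq_nil (by omega)
    simp only [max_mushrooms, max_mushrooms_alt, e1, e2, List.foldl_nil, List.map_nil,
      List.nil_append, PySem.List.max?_id_cons, Option.getD_some]
  case pos =>
  obtain ⟨hk0, hkn⟩ := hc
  simp only [max_mushrooms, max_mushrooms_alt]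
  rw [prefix_build]
  rw [PySem.List.max?_id_cons, Option.getD_some, List.map_append, List.map_map,
      List.map_map, List.foldl_append, List.foldl_map, List.foldl_map]
  have h1 :
      (PySem.List.pyRange 0 (min m k + 1)).foldl
        (fun mc i => max mc
          (PySem.List.pyGetD ((List.range (a.length + 1)).map (fun j => ((a.take j).sum : Int)))
              (min ((a.length : Int) - 1) (max k (k + (m - 2 * i))) + 1) 0
            - PySem.List.pyGetD ((List.range (a.length + 1)).map (fun j => ((a.take j).sum : Int)))
              (k - i) 0)) 0
      = (PySem.List.pyRange 0 (min m k + 1)).foldl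
        (fun mc i => max mc
          ((PySem.List.slice a (some (k - i))
            (some (min ((a.length : Int) - 1) (max k (k + m - 2 * i)) + 1))).sum)) 0 := by
    apply PySem.List.foldl_congr_mem
    intro acc i hi
    rw [PySem.List.mem_pyRange_one] at hi
    rw [loop1_val a k m i hkn hi.1 (by omega)]
  rw [h1]
  apply PySem.List.foldl_congr_mem
  intro acc i hi
  rw [PySem.List.mem_pyRange_one] at hi
  simp only [Function.comp_apply]
  rw [loop2_val a k m i hk0 hi.1 (by omega)]
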